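-- pv_equiv track=rewrite | github.com/lggruspe/sausage | ssg/wildcards.py | find_wildcards
-- ===== SOURCE A (Python) =====
-- import typing as t
--
-- def find_wildcards(string: str) -> t.Iterable[int]:
--     """Find '%'s in string."""
--     i = len(string)
--     while i >= 0:
--         j = string.rfind("%", 0, i)
--         if j < 0:
--             break
--         if j == 0 or string[j - 1] != "%":
--             yield j
--         i = j
-- ===== SOURCE B (Python) =====
-- import typing as t
--
-- def find_wildcards(string: str) -> t.Iterable[int]:
--     """Find '%'s in string."""
--     for k in reversed(range(len(string))):
--         if string[k] == "%" and (k == 0 or string[k - 1] != "%"):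
--             yield k
-- ===== Notes on version B (the rewrite author's own statement) =====
-- stated objective: idiomatic
-- what changed: Replaced the rfind-based while loop (repeated library substring searches with break/yield control flow) by a single reversed index scan with a direct per-character test.
import Mathlib
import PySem

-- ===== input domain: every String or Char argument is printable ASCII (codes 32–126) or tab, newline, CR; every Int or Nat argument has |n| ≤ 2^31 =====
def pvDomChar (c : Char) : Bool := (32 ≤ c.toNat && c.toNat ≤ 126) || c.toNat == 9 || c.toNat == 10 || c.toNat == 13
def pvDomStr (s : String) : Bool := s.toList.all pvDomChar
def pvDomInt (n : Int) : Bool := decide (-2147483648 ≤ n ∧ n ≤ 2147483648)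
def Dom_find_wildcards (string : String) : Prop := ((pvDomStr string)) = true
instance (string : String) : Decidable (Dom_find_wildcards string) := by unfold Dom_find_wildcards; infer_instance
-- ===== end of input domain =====

-- B replaces A's rfind-based while loop by a reversed index scan with a direct
-- per-character test (idiomatic; same output, same descending order).

-- ===== PORT A =====
-- string.rfind("%", 0, i): last index j < i with '%', as an Option (none = -1 / break).
def pvRfindPct (cs : List Char) : Nat → Option Nat
  | 0 => none
  | i + 1 => if cs.getD i ' ' = '%' then some i else pvRfindPct cs i

theorem pvRfindPct_lt (cs : List Char) (i j : Nat) (h : pvRfindPct cs i = some j) : j < i := by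
  induction i with
  | zero => simp [pvRfindPct] at h
  | succ m ih =>
      simp only [pvRfindPct] at h
      split at h
      · obtain rfl : j = m := by simpa using h.symm
        omega
      · exact Nat.lt_trans (ih h) (Nat.lt_succ_self m)

-- the while loop: i counts down; rfind result j < i becomes the next i.
def pvLoopA (cs : List Char) (i : Nat) : List Int :=
  match h : pvRfindPct cs i with
  | none => []
  | some j =>
      if j = 0 ∨ cs.getD (j - 1) ' ' ≠ '%' then
        (j : Int) :: pvLoopA cs j
      else
        pvLoopA cs j
  termination_by i
  decreasing_by all_goals exact pvRfindPct_lt cs i j h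

def find_wildcards (string : String) : List Int :=
  pvLoopA string.toList string.toList.length

-- ===== PORT B =====
-- for k in reversed(range(len(string))): yield k if string[k]=='%' and (k==0 or string[k-1]!='%')
def pvKeep (cs : List Char) (k : Nat) : Option Int :=
  if cs.getD k ' ' = '%' ∧ (k = 0 ∨ cs.getD (k - 1) ' ' ≠ '%') then some (k : Int) else none

def find_wildcards_alt (string : String) : List Int :=
  (List.range string.toList.length).reverse.filterMap (pvKeep string.toList)

-- ===== PRECONDITION & SPEC =====
def Spec_find_wildcards (string : String) (out : List Int) : Prop := out = find_wildcards_alt string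
instance (string : String) (out : List Int) : Decidable (Spec_find_wildcards string out) := by unfold Spec_find_wildcards; infer_instance

-- ===== CLAIM (what is proved, stated in full; the proofs are below) =====
def Claim_equal_find_wildcards : Prop := ∀ (string : String), Dom_find_wildcards string → Spec_find_wildcards string (find_wildcards string)

-- ===== LEMMAS AND PROOFS =====
def pvF (cs : List Char) (i : Nat) : List Int :=
  (List.range i).reverse.filterMap (pvKeep cs)

theorem pvF_succ (cs : List Char) (m : Nat) :
    pvF cs (m + 1) = (pvKeep cs m).toList ++ pvF cs m := by
  simp only [pvF, List.range_succ, List.reverse_append, List.reverse_cons, List.reverse_nil,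
    List.nil_append, List.singleton_append, List.filterMap_cons]
  cases h : pvKeep cs m <;> simp [h, pvF]

theorem pvRfindPct_none (cs : List Char) (i : Nat) (h : pvRfindPct cs i = none) :
    ∀ k, k < i → cs.getD k ' ' ≠ '%' := by
  induction i with
  | zero => intro k hk; omega
  | succ m ih =>
      simp only [pvRfindPct] at h
      split at h
      · simp at h
      · intro k hk
        rcases Nat.lt_succ_iff_lt_or_eq.mp hk with hlt | rfl
        · exact ih h k hlt
        · assumption

theorem pvRfindPct_some (cs : List Char) (i j : Nat) (h : pvRfindPct cs i = some j) :
    j < i ∧ cs.getD j ' ' = '%' ∧ ∀ k, j < k → k < i → cs.getD k ' ' ≠ '%' := by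
  induction i with
  | zero => simp [pvRfindPct] at h
  | succ m ih =>
      simp only [pvRfindPct] at h
      split at h
      · rename_i hc
        obtain rfl : j = m := by simpa using h.symm
        exact ⟨Nat.lt_succ_self _, hc, by intro k hk1 hk2; omega⟩
      · obtain ⟨h1, h2, h3⟩ := ih h
        refine ⟨Nat.lt_trans h1 (Nat.lt_succ_self m), h2, ?_⟩
        intro k hk1 hk2
        rcases Nat.lt_succ_iff_lt_or_eq.mp hk2 with hlt | rfl
        · exact h3 k hk1 hlt
        · assumption

theorem pvF_stable (cs : List Char) (j : Nat) :
    ∀ i, j + 1 ≤ i → (∀ k, j < k → k < i → cs.getD k ' ' ≠ '%') → pvF cs i = pvF cs (j + 1) := by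
  intro i
  induction i with
  | zero => intro h; omega
  | succ m ih =>
      intro hle hgap
      rcases Nat.lt_or_ge (j + 1) (m + 1) with hlt | hge
      · have hm : cs.getD m ' ' ≠ '%' := hgap m (by omega) (Nat.lt_succ_self m)
        rw [pvF_succ]
        have : pvKeep cs m = none := by
          simp only [pvKeep]; rw [if_neg]; tauto
        rw [this]
        simp only [Option.toList_none, List.nil_append]
        exact ih (by omega) (fun k h1 h2 => hgap k h1 (by omega))
      · have : j + 1 = m + 1 := by omega
        rw [this]

theorem pvLoopA_eq_pvF (cs : List Char) : ∀ i, pvLoopA cs i = pvF cs i := by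
  intro i
  induction i using Nat.strong_induction_on with
  | _ i IH =>
      rw [pvLoopA]
      cases h : pvRfindPct cs i with
      | none =>
          have := pvRfindPct_none cs i h
          simp only
          symm
          simp only [pvF, List.filterMap_eq_nil_iff]
          intro k hk
          rw [List.mem_reverse, List.mem_range] at hk
          simp only [pvKeep]; rw [if_neg]
          have := this k hk; tauto
      | some j =>
          obtain ⟨h1, h2, h3⟩ := pvRfindPct_some cs i j h
          have hstable : pvF cs i = pvF cs (j + 1) := pvF_stable cs j i (by omega) h3
          have hsucc := pvF_succ cs j
          simp only
          by_cases hc : j = 0 ∨ cs.getD (j - 1) ' ' ≠ '%'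
          · rw [if_pos hc, IH j h1, hstable, hsucc]
            simp only [pvKeep]; rw [if_pos ⟨h2, hc⟩]; rfl
          · rw [if_neg hc, IH j h1, hstable, hsucc]
            simp only [pvKeep]; rw [if_neg]; · rfl
            · tauto

-- ===== VERDICT (by name: the statement is the Claim_ definition above) =====
theorem find_wildcards_spec : Claim_equal_find_wildcards := by
  intro s _
  unfold Spec_find_wildcards find_wildcards find_wildcards_alt
  exact pvLoopA_eq_pvF s.toList s.toList.length
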